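-- pv_equiv track=rewrite | github.com/Joshua-Anderson/469-project | scheduler.py | token_alg
-- ===== SOURCE A (Python) =====
-- def token_alg(sats, pl_list, token_map, gs_sched, t):
--
--     max_token = -1
--     res = ""
--
--     # find sat with max token and decrement its token
--     for sat in sats:
--         if(token_map[sat] > max_token):
--             res = sat
--             max_token = token_map[sat]
--
--     if(max_token > 0):
--         token_map[res] -= 1
--
--     # increase all other sats tokens
--     for sat in token_map:
--         if(sat != res):
--             token_map[sat] += 1
--
--     return res
-- ===== SOURCE B (Python) =====
-- def token_alg(sats, pl_list, token_map, gs_sched, t):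
--     # rank the satellites by token count (stable descending sort keeps the
--     # first holder of the maximum in front), pick the leader if it beats the
--     # -1 sentinel, then rebalance every token in one arithmetic pass
--     ranked = sorted(sats, key=lambda s: token_map[s], reverse=True)
--     if ranked and token_map[ranked[0]] > -1:
--         res, best = ranked[0], token_map[ranked[0]]
--     else:
--         res, best = "", -1
--     for k in token_map:
--         token_map[k] += 1 if k != res else (-1 if best > 0 else 0)
--     return res
-- ===== Notes on version B (the rewrite author's own statement) =====
-- stated objective: alternative
-- what changed: A keeps a running (max_token, res) argmax pair in one scan and patches token_map around the chosen satellite in two staged loops; B stably sorts the satellites by token count in descending order, takes the head of the ranking (the first max-token satellite) if it beats the -1 sentinel, and rebalances all tokens in a single arithmetic pass.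
import Mathlib
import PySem

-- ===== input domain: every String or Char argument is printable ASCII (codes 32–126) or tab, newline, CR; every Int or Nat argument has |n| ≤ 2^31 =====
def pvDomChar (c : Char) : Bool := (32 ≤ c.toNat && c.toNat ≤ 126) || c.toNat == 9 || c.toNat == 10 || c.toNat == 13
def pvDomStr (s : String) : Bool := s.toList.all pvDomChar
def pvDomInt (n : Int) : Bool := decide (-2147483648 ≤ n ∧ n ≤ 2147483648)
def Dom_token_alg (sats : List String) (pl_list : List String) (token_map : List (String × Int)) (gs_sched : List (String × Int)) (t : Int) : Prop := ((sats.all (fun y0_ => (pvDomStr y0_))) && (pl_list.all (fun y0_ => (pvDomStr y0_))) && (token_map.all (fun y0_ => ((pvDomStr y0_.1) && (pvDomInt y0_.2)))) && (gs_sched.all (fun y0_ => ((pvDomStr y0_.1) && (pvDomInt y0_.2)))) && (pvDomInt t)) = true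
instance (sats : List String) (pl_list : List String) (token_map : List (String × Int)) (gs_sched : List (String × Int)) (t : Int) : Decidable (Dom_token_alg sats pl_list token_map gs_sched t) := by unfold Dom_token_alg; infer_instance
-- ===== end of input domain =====

-- B replaces A's running-argmax loop by a stable descending sort of the satellites by token
-- count (the leader is the first max-token satellite) and rebalances the tokens in one
-- arithmetic pass; objective: alternative decomposition, same observable result.
-- Both A and B mutate token_map's values in place in Python (identically); the equivalence
-- proved here is about the RETURN value.

-- ===== PORT A =====
def token_alg (sats : List String) (pl_list : List String) (token_map : List (String × Int)) (gs_sched : List (String × Int)) (t : Int) : String :=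
  -- token_map[sat]: under Pre_ every sat is a key of the dict, so getD's default is never used
  -- for sat in sats: if token_map[sat] > max_token: res = sat; max_token = token_map[sat]
  (sats.foldl (fun (st : Int × String) sat =>
      if ((PySem.Dict.ofList token_map).get? sat).getD 0 > st.1
      then (((PySem.Dict.ofList token_map).get? sat).getD 0, sat) else st) (-1, "")).2
  -- the two mutation steps (decrement res, increment the others) change only token_map, not res

-- ===== PORT B =====
def token_alg_alt (sats : List String) (pl_list : List String) (token_map : List (String × Int)) (gs_sched : List (String × Int)) (t : Int) : String :=
  -- ranked = sorted(sats, key=lambda s: token_map[s], reverse=True)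
  match PySem.List.sorted sats (fun s => ((PySem.Dict.ofList token_map).get? s).getD 0) true with
  -- if ranked and token_map[ranked[0]] > -1: res = ranked[0] else res = ""
  | [] => ""
  | r :: _ => if ((PySem.Dict.ofList token_map).get? r).getD 0 > -1 then r else ""
  -- the rebalancing pass after this mutates only token_map, not res

-- ===== PRECONDITION & SPEC =====
-- Pre_ excludes exactly the inputs where Python A raises KeyError: some sat in sats not a key of token_map.
def Pre_token_alg (sats : List String) (pl_list : List String) (token_map : List (String × Int)) (gs_sched : List (String × Int)) (t : Int) : Prop :=
  ∀ s ∈ sats, s ∈ token_map.map Prod.fst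
instance (sats : List String) (pl_list : List String) (token_map : List (String × Int)) (gs_sched : List (String × Int)) (t : Int) : Decidable (Pre_token_alg sats pl_list token_map gs_sched t) := by unfold Pre_token_alg; infer_instance
def pvWitness_token_alg : List String × List String × (List (String × Int)) × (List (String × Int)) × Int :=
  (["a", "b", "a"], ["p"], [("a", 2), ("b", 3), ("c", 0)], [("g", 1)], 5)

def Spec_token_alg (sats : List String) (pl_list : List String) (token_map : List (String × Int)) (gs_sched : List (String × Int)) (t : Int) (out : String) : Prop := out = token_alg_alt sats pl_list token_map gs_sched t
instance (sats : List String) (pl_list : List String) (token_map : List (String × Int)) (gs_sched : List (String × Int)) (t : Int) (out : String) : Decidable (Spec_token_alg sats pl_list token_map gs_sched t out) := by unfold Spec_token_alg; infer_instance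

-- ===== CLAIM (what is proved, stated in full; the proofs are below) =====
def Claim_equal_token_alg : Prop := ∀ (sats : List String) (pl_list : List String) (token_map : List (String × Int)) (gs_sched : List (String × Int)) (t : Int), Dom_token_alg sats pl_list token_map gs_sched t → Pre_token_alg sats pl_list token_map gs_sched t → Spec_token_alg sats pl_list token_map gs_sched t (token_alg sats pl_list token_map gs_sched t)

-- ===== LEMMAS AND PROOFS =====

-- The joint invariant of A's argmax loop and B's insertion-sort fold: either the current
-- sorted accumulator's head is exactly A's current leader (and its token beats the -1
-- sentinel), or no satellite seen so far beats the sentinel and A's state is still (-1, "").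
theorem pv_fold_bridge (key : String → Int) (p : List String) :
    ∀ (m : Int) (r : String) (acc : List String),
    ((acc.head? = some r ∧ key r = m ∧ m > -1) ∨ ((∀ y ∈ acc, key y ≤ -1) ∧ m = -1 ∧ r = "")) →
    (let st := p.foldl (fun (st : Int × String) sat =>
        if key sat > st.1 then (key sat, sat) else st) (m, r)
     let srt := p.foldl (fun acc x =>
        PySem.List.insertBy (fun a b => decide (key b < key a)) x acc) acc
     (srt.head? = some st.2 ∧ key st.2 = st.1 ∧ st.1 > -1) ∨
       ((∀ y ∈ srt, key y ≤ -1) ∧ st = (-1, ""))) := by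
  induction p with
  | nil =>
    intro m r acc h
    simp only [List.foldl_nil]
    rcases h with ⟨h1, h2, h3⟩ | ⟨h1, h2, h3⟩
    · exact Or.inl ⟨h1, h2, h3⟩
    · exact Or.inr ⟨h1, by rw [h2, h3]⟩
  | cons x p ih =>
    intro m r acc h
    simp only [List.foldl_cons]
    rcases h with ⟨h1, h2, h3⟩ | ⟨h1, h2, h3⟩
    · -- disjunct 1: acc = r :: tail, key r = m > -1
      cases acc with
      | nil => simp at h1
      | cons a tl =>
      simp only [List.head?_cons, Option.some.injEq] at h1
      subst h1
      by_cases hx : key x > m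
      · rw [if_pos hx]
        apply ih
        left
        refine ⟨?_, rfl, by omega⟩
        have : decide (key a < key x) = true := by simp; omega
        simp [PySem.List.insertBy, this]
      · rw [if_neg hx]
        apply ih
        left
        refine ⟨?_, h2, h3⟩
        have : decide (key a < key x) = false := by simp; omega
        simp [PySem.List.insertBy, this]
    · -- disjunct 2: everything in acc ≤ -1 and state is (-1, "")
      subst h2; subst h3
      by_cases hx : key x > -1
      · rw [if_pos hx]
        apply ih
        left
        refine ⟨?_, rfl, hx⟩
        cases acc with
        | nil => simp [PySem.List.insertBy]
        | cons a tl =>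
          have ha : key a ≤ -1 := h1 a (by simp)
          have : decide (key a < key x) = true := by simp; omega
          simp [PySem.List.insertBy, this]
      · rw [if_neg hx]
        apply ih
        right
        refine ⟨?_, rfl, rfl⟩
        intro y hy
        rcases (PySem.List.mem_insertBy _ x y acc).mp hy with h | h
        · subst h; omega
        · exact h1 y h

-- ===== VERDICT (by name: the statement is the Claim_ definition above) =====
theorem token_alg_spec : Claim_equal_token_alg := by
  intro sats pl_list token_map gs_sched t _ _
  unfold Spec_token_alg token_alg token_alg_alt
  have hb := pv_fold_bridge (fun s => ((PySem.Dict.ofList token_map).get? s).getD 0) sats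
    (-1) "" [] (Or.inr ⟨by simp, rfl, rfl⟩)
  rw [PySem.List.sorted_rev_eq_foldl_insertBy]
  rcases hb with ⟨h1, h2, h3⟩ | ⟨h1, h2⟩
  · -- a leader was found: the sorted head is A's result and its token beats -1
    cases hsrt : sats.foldl (fun acc x =>
        PySem.List.insertBy (fun a b => decide (((PySem.Dict.ofList token_map).get? b).getD 0 <
          ((PySem.Dict.ofList token_map).get? a).getD 0)) x acc) [] with
    | nil => rw [hsrt] at h1; simp at h1
    | cons r tl =>
      rw [hsrt] at h1
      simp only [List.head?_cons, Option.some.injEq] at h1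
      subst h1
      simp [h2, h3]
  · -- no token beats the sentinel: A returns "", B's head (if any) fails the > -1 test
    rw [h2]
    cases hsrt : sats.foldl (fun acc x =>
        PySem.List.insertBy (fun a b => decide (((PySem.Dict.ofList token_map).get? b).getD 0 <
          ((PySem.Dict.ofList token_map).get? a).getD 0)) x acc) [] with
    | nil => rfl
    | cons r tl =>
      have hr : ((PySem.Dict.ofList token_map).get? r).getD 0 ≤ -1 := by
        apply h1; rw [hsrt]; simp
      simp only []
      rw [if_neg (by omega)]
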